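-- pv_equiv track=rewrite | github.com/damnenby/homeworks | first_test.py | shortener
-- ===== SOURCE A (Python) =====
-- def shortener(string):
--     arr = string.split(' ')
--     strarr = []
--     for item in arr:
--         if len(item) > 6:
--             strarr.append(item[:6] + '*')
--         else:
--             strarr.append(item)
--     res = ' '.join(strarr)
--     return res
-- ===== SOURCE B (Python) =====
-- def shortener(string):
--     # single left-to-right scan: copy space characters, truncate each maximal
--     # run of non-space characters longer than 6 to its first 6 chars plus an asterisk
--     out = []
--     i = 0
--     n = len(string)
--     while i < n:
--         if string[i] == ' ':
--             out.append(' ')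
--             i += 1
--         else:
--             j = i
--             while j < n and string[j] != ' ':
--                 j += 1
--             word = string[i:j]
--             out.append(word[:6] + '*' if j - i > 6 else word)
--             i = j
--     return ''.join(out)
-- ===== Notes on version B (the rewrite author's own statement) =====
-- stated objective: alternative
-- what changed: Replaces the split/loop/join pipeline with a single character-level scan that copies space characters and truncates each maximal non-space run in place, never building the intermediate word list.
import Mathlib
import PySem

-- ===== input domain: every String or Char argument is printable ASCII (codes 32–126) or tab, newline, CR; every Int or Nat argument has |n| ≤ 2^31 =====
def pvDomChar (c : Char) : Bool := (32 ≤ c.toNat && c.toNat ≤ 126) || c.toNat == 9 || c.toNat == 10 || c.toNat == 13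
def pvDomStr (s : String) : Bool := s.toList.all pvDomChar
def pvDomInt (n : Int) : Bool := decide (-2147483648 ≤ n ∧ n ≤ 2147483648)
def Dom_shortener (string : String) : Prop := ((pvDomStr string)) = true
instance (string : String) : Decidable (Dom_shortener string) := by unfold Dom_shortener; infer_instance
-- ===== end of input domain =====

-- B replaces A's split/loop/join with one character-level scan over the string; alternative, same cost.

-- ===== PORT A =====
def shortener (string : String) : String :=
  let arr := PySem.Chars.splitOn string.toList [' ']
  let strarr := arr.foldl
    (fun acc item =>
      if item.length > 6 then acc ++ [PySem.List.slice item none (some 6) ++ ['*']]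
      else acc ++ [item]) []
  String.ofList (PySem.Chars.join [' '] strarr)

-- ===== PORT B =====
-- the inner while loop finding the end of the word is takeWhile/dropWhile on the tail
def subAsterisk : List Char → List Char
  | [] => []
  | c :: cs =>
    if c = ' ' then ' ' :: subAsterisk cs
    else
      let w := c :: cs.takeWhile (· ≠ ' ')
      let r := cs.dropWhile (· ≠ ' ')
      (if w.length > 6 then PySem.List.slice w none (some 6) ++ ['*'] else w) ++ subAsterisk r
termination_by l => l.length
decreasing_by
  · simp
  · have := List.length_dropWhile_le (p := fun x => decide (x ≠ ' ')) (l := cs)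
    simp at *; omega

def shortener_alt (string : String) : String :=
  String.ofList (subAsterisk string.toList)

-- ===== PRECONDITION & SPEC =====
def Spec_shortener (string : String) (out : String) : Prop := out = shortener_alt string
instance (string : String) (out : String) : Decidable (Spec_shortener string out) := by unfold Spec_shortener; infer_instance

-- ===== CLAIM (what is proved, stated in full; the proofs are below) =====
def Claim_equal_shortener : Prop := ∀ (string : String), Dom_shortener string → Spec_shortener string (shortener string)

-- ===== LEMMAS AND PROOFS =====

-- reference splitter: Python's split(' ') on char lists
def splitSp : List Char → List (List Char)
  | [] => [[]]
  | c :: cs => if c = ' ' then [] :: splitSp cs else (splitSp cs).modifyHead (c :: ·)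

def repl (w : List Char) : List Char :=
  if w.length > 6 then PySem.List.slice w none (some 6) ++ ['*'] else w

theorem splitSp_space (cs : List Char) : splitSp (' ' :: cs) = [] :: splitSp cs := by
  simp [splitSp]

theorem splitSp_word (c : Char) (cs : List Char) (hc : c ≠ ' ') :
    splitSp (c :: cs) = (splitSp cs).modifyHead (c :: ·) := by
  simp only [splitSp]; rw [if_neg hc]

theorem subAsterisk_space (cs : List Char) : subAsterisk (' ' :: cs) = ' ' :: subAsterisk cs := by
  simp [subAsterisk]

theorem subAsterisk_word (c : Char) (cs : List Char) (hc : c ≠ ' ') :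
    subAsterisk (c :: cs)
      = repl (c :: cs.takeWhile (· ≠ ' ')) ++ subAsterisk (cs.dropWhile (· ≠ ' ')) := by
  rw [subAsterisk]
  rw [if_neg hc]
  rfl

theorem splitSp_ne_nil (l : List Char) : splitSp l ≠ [] := by
  induction l with
  | nil => simp [splitSp]
  | cons c cs ih =>
    by_cases hc : c = ' '
    · subst hc; rw [splitSp_space]; simp
    · rw [splitSp_word c cs hc]
      cases h : splitSp cs with
      | nil => exact absurd h ih
      | cons a t => simp [List.modifyHead]

theorem foldl_append_repl (l : List (List Char)) (acc : List (List Char)) :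
    l.foldl (fun acc item =>
      if item.length > 6 then acc ++ [PySem.List.slice item none (some 6) ++ ['*']]
      else acc ++ [item]) acc = acc ++ l.map repl := by
  induction l generalizing acc with
  | nil => simp
  | cons x xs ih =>
    simp only [List.foldl_cons, List.map_cons]
    rw [ih]
    by_cases h : x.length > 6 <;> simp [repl, h]

theorem go_eq_splitSp (l : List Char) (fuel : Nat) (cur : List Char) (acc : List (List Char))
    (h : l.length < fuel) :
    PySem.Chars.splitOn.go [' '] fuel l cur acc
      = acc.reverse ++ (splitSp l).modifyHead (cur.reverse ++ ·) := by
  induction fuel generalizing l cur acc with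
  | zero => omega
  | succ f ih =>
    cases l with
    | nil =>
      simp [PySem.Chars.splitOn.go, splitSp, List.modifyHead]
    | cons c cs =>
      by_cases hc : c = ' '
      · subst hc
        rw [PySem.Chars.splitOn.go]
        have hpre : [' '].isPrefixOf (' ' :: cs) = true := by simp [List.isPrefixOf]
        simp only [hpre, if_pos]
        rw [ih _ _ _ (by simpa using Nat.lt_of_succ_lt_succ h)]
        have hd : List.drop [' '].length (' ' :: cs) = cs := rfl
        rw [hd, splitSp_space]
        cases hsp : splitSp cs with
        | nil => exact absurd hsp (splitSp_ne_nil cs)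
        | cons a t => simp [List.modifyHead]
      · rw [PySem.Chars.splitOn.go]
        have hpre : [' '].isPrefixOf (c :: cs) = false := by
          simp [List.isPrefixOf]
          exact fun hx => hc hx.symm
        simp only [hpre]
        rw [if_neg (by simp)]
        rw [ih _ _ _ (by simpa using Nat.lt_of_succ_lt_succ h)]
        rw [splitSp_word c cs hc]
        cases hsp : splitSp cs with
        | nil => exact absurd hsp (splitSp_ne_nil cs)
        | cons a t => simp [List.modifyHead]

theorem splitSp_nospace_append (w l : List Char) (hw : ∀ a ∈ w, a ≠ ' ') :
    splitSp (w ++ l) = (splitSp l).modifyHead (w ++ ·) := by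
  induction w with
  | nil =>
    cases h : splitSp l with
    | nil => exact absurd h (splitSp_ne_nil l)
    | cons a t => rw [List.nil_append, h]; simp [List.modifyHead]
  | cons c cs ih =>
    have hc : c ≠ ' ' := hw c (by simp)
    rw [List.cons_append, splitSp_word c (cs ++ l) hc, ih (fun a ha => hw a (by simp [ha]))]
    cases h : splitSp l with
    | nil => exact absurd h (splitSp_ne_nil l)
    | cons a t => simp [List.modifyHead]

theorem join_map_repl_splitSp : ∀ n (s : List Char), s.length ≤ n →
    PySem.Chars.join [' '] ((splitSp s).map repl) = subAsterisk s := by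
  intro n
  induction n with
  | zero =>
    intro s hs
    have : s = [] := by cases s <;> simp_all
    subst this
    simp [splitSp, repl, subAsterisk, PySem.Chars.join_singleton]
  | succ m ih =>
    intro s hs
    cases s with
    | nil => simp [splitSp, repl, subAsterisk, PySem.Chars.join_singleton]
    | cons c cs =>
      by_cases hc : c = ' '
      · subst hc
        rw [splitSp_space, List.map_cons]
        cases h : (splitSp cs).map repl with
        | nil => exact absurd (List.map_eq_nil_iff.mp h) (splitSp_ne_nil cs)
        | cons a t =>
          rw [PySem.Chars.join_cons_cons, ← h,
            ih cs (by simpa using Nat.le_of_succ_le_succ hs), subAsterisk_space]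
          simp [repl]
      · have hsplit : cs.takeWhile (· ≠ ' ') ++ cs.dropWhile (· ≠ ' ') = cs :=
          List.takeWhile_append_dropWhile
        have hw : ∀ a ∈ (c :: cs.takeWhile (· ≠ ' ')), a ≠ ' ' := by
          intro a ha
          rcases List.mem_cons.mp ha with h1 | h1
          · simpa [h1] using hc
          · simpa using List.mem_takeWhile_imp h1
        have hsp : splitSp (c :: cs)
            = (splitSp (cs.dropWhile (· ≠ ' '))).modifyHead
                ((c :: cs.takeWhile (· ≠ ' ')) ++ ·) := by
          conv_lhs => rw [show (c :: cs)
            = (c :: cs.takeWhile (· ≠ ' ')) ++ cs.dropWhile (· ≠ ' ') from by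
              rw [List.cons_append, hsplit]]
          exact splitSp_nospace_append _ _ hw
        rw [hsp, subAsterisk_word c cs hc]
        cases hr : cs.dropWhile (· ≠ ' ') with
        | nil =>
          simp [splitSp, List.modifyHead, PySem.Chars.join_singleton, subAsterisk]
        | cons d r' =>
          have hd : d = ' ' := by
            have := List.head_dropWhile_not (p := fun x => decide (x ≠ ' ')) (l := cs)
            rw [hr] at this
            simpa using this (by simp)
          subst hd
          have hlen : r'.length ≤ m := by
            have h1 : cs.length = (cs.takeWhile (· ≠ ' ')).length + (' ' :: r').length := by
              conv_lhs => rw [← hsplit]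
              rw [hr]; simp
            simp only [List.length_cons] at hs h1
            omega
          rw [splitSp_space]
          simp only [List.modifyHead, List.map_cons, List.append_nil]
          cases hmap : (splitSp r').map repl with
          | nil => exact absurd (List.map_eq_nil_iff.mp hmap) (splitSp_ne_nil r')
          | cons a t =>
            rw [PySem.Chars.join_cons_cons, ← hmap, ih r' hlen, subAsterisk_space]
            simp

theorem shortener_eq (s : List Char) :
    PySem.Chars.join [' ']
      ((PySem.Chars.splitOn s [' ']).foldl
        (fun acc item =>
          if item.length > 6 then acc ++ [PySem.List.slice item none (some 6) ++ ['*']]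
          else acc ++ [item]) [])
      = subAsterisk s := by
  rw [foldl_append_repl]
  rw [show PySem.Chars.splitOn s [' ']
    = PySem.Chars.splitOn.go [' '] (s.length + 1) s [] [] from rfl]
  rw [go_eq_splitSp s (s.length + 1) [] [] (by omega)]
  have : (splitSp s).modifyHead (([] : List Char).reverse ++ ·) = splitSp s := by
    cases h : splitSp s with
    | nil => exact absurd h (splitSp_ne_nil s)
    | cons a t => simp [List.modifyHead]
  rw [this]
  simpa using join_map_repl_splitSp s.length s (le_refl _)

-- ===== VERDICT (by name: the statement is the Claim_ definition above) =====
theorem shortener_spec : Claim_equal_shortener := by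
  intro s _
  unfold Spec_shortener shortener shortener_alt
  simp only []
  rw [shortener_eq]
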